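-- pv_equiv track=rewrite | github.com/Abdiaziz-Ibrahim-Adam/University_Courses_-_Projects | Aplied Algorithmic Problem Solving Course/P4/weightofwords.py | get_weighted_word
-- ===== SOURCE A (Python) =====
-- def get_weighted_word(L, W):
--     letters = "abcdefghijklmnopqrstuvwxyz"  # List of letters
--
--     # Controlling if its even possible to form a string
--     if W < L or W > L * 26:
--         return "impossible"
--
--     word = []
--     remaining_weight = W
--
--     for i in range(L):
--         # Determining the highest possible letter without exceeding `remaining_weight`
--         for j in range(25, -1, -1):  # Starting from 'z' (index 25) down to 'a' (index 0)
--             if remaining_weight - (j + 1) >= (L - len(word) - 1):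
--                 word.append(letters[j])  # Add the letter to the word
--                 remaining_weight -= (j + 1)
--                 break
--
--     return "".join(word)  # Convert list to string
-- ===== SOURCE B (Python) =====
-- def get_weighted_word(L, W):
--     # Closed-form construction instead of A's greedy nested loops.
--     if W < L or W > L * 26:
--         return "impossible"
--     excess = W - L
--     q, r = divmod(excess, 25)
--     if q >= L:                 # only possible when W == 26*L (q == L, r == 0)
--         return "z" * L
--     return "z" * q + chr(ord("a") + r) + "a" * (L - q - 1)
-- ===== Notes on version B (the rewrite author's own statement) =====
-- stated objective: simpler
-- what changed: Replaces A's greedy outer loop with its inner 26-letter descending scan by a closed-form construction: q,r = divmod(W-L,25) gives q 'z's, one transition letter chr(ord('a')+r), and 'a'-padding.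
import Mathlib
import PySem

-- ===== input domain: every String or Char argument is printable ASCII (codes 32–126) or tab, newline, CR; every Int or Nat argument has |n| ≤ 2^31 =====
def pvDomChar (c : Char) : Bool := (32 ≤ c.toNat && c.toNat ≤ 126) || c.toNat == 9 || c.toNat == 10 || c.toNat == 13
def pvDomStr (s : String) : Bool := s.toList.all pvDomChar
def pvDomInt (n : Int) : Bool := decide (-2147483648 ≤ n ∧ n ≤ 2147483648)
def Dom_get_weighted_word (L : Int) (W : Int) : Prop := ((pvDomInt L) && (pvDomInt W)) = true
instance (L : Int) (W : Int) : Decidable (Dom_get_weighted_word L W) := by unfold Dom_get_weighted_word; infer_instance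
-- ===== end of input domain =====

-- B replaces A's greedy loop (with its inner 26-letter scan) by a closed-form divmod construction; simpler, same return value everywhere.

-- ===== PORT A =====
def pvLetters : List Char := "abcdefghijklmnopqrstuvwxyz".toList

-- inner loop: `for j in range(25,-1,-1): if cond: append; break` — j counts down from 25 to 0
def pvInner (L : Int) (j : Nat) (word : List Char) (rem : Int) : List Char × Int :=
  if rem - ((j : Int) + 1) ≥ L - word.length - 1 then
    (word ++ [pvLetters.getD j ' '], rem - ((j : Int) + 1))
  else
    match j with
    | 0 => (word, rem)
    | j' + 1 => pvInner L j' word rem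

-- outer loop: `for i in range(L)` — L.toNat iterations over the state (word, remaining_weight)
def pvOuter (L : Int) : Nat → List Char × Int → List Char × Int
  | 0, st => st
  | n + 1, st => pvOuter L n (pvInner L 25 st.1 st.2)

def get_weighted_word (L : Int) (W : Int) : String :=
  if W < L ∨ W > L * 26 then "impossible"
  else String.ofList (pvOuter L L.toNat ([], W)).1

-- ===== PORT B =====
def get_weighted_word_alt (L : Int) (W : Int) : String :=
  if W < L ∨ W > L * 26 then "impossible"
  else
    let excess := W - L
    let q := PySem.Int.floordiv excess 25
    let r := PySem.Int.mod excess 25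
    if q ≥ L then String.ofList (List.replicate L.toNat 'z')
    else String.ofList (List.replicate q.toNat 'z' ++
                    [Char.ofNat ('a'.toNat + r.toNat)] ++
                    List.replicate (L - q - 1).toNat 'a')

-- ===== PRECONDITION & SPEC =====
def Spec_get_weighted_word (L : Int) (W : Int) (out : String) : Prop := out = get_weighted_word_alt L W
instance (L : Int) (W : Int) (out : String) : Decidable (Spec_get_weighted_word L W out) := by unfold Spec_get_weighted_word; infer_instance

-- ===== CLAIM (what is proved, stated in full; the proofs are below) =====
def Claim_equal_get_weighted_word : Prop := ∀ (L : Int) (W : Int), Dom_get_weighted_word L W → Spec_get_weighted_word L W (get_weighted_word L W)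

-- ===== LEMMAS AND PROOFS =====

-- closed form of what the greedy loop produces from n iterations with remaining weight rem
def pvBuild (n : Nat) (rem : Int) : List Char :=
  let e := (rem - (n : Int)).toNat
  let q := e / 25
  let r := e % 25
  if n ≤ q then List.replicate n 'z'
  else List.replicate q 'z' ++ [Char.ofNat (97 + r)] ++ List.replicate (n - q - 1) 'a'

theorem pvLetters_getD (k : Nat) (hk : k < 26) :
    pvLetters.getD k ' ' = Char.ofNat (97 + k) := by
  interval_cases k <;> decide

theorem pvInner_spec (j : Nat) (L : Int) (word : List Char) (rem : Int)
    (h1 : 1 ≤ rem - (L - word.length - 1)) :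
    pvInner L j word rem =
      (word ++ [pvLetters.getD (min j (rem - (L - word.length - 1) - 1).toNat) ' '],
       rem - min ((j : Int) + 1) (rem - (L - word.length - 1))) := by
  induction j with
  | zero =>
    simp only [pvInner]
    rw [if_pos (by push_cast; omega)]
    have hm1 : min 0 (rem - (L - (word.length : Int) - 1) - 1).toNat = 0 := by omega
    have hm2 : min (((0 : Nat) : Int) + 1) (rem - (L - (word.length : Int) - 1)) = ((0 : Nat) : Int) + 1 := by
      push_cast; omega
    rw [hm1, hm2]
  | succ j' ih =>
    simp only [pvInner]
    by_cases h : rem - (((j' + 1 : Nat) : Int) + 1) ≥ L - word.length - 1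
    · rw [if_pos h]
      push_cast at h
      have hm1 : min (j' + 1) (rem - (L - (word.length : Int) - 1) - 1).toNat = j' + 1 := by omega
      have hm2 : min (((j' + 1 : Nat) : Int) + 1) (rem - (L - (word.length : Int) - 1)) = ((j' + 1 : Nat) : Int) + 1 := by
        push_cast; omega
      rw [hm1, hm2]
    · rw [if_neg h]
      push_cast at h
      rw [ih]
      have hm1 : min (j' + 1) (rem - (L - (word.length : Int) - 1) - 1).toNat
               = min j' (rem - (L - (word.length : Int) - 1) - 1).toNat := by omega
      have hm2 : min (((j' + 1 : Nat) : Int) + 1) (rem - (L - (word.length : Int) - 1))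
               = min (((j' : Nat) : Int) + 1) (rem - (L - (word.length : Int) - 1)) := by
        push_cast; omega
      rw [hm1, hm2]

theorem pvOuter_spec (n : Nat) : ∀ (L : Int) (word : List Char) (rem : Int),
    L - word.length = n → (n : Int) ≤ rem → rem ≤ 26 * n →
    (pvOuter L n (word, rem)).1 = word ++ pvBuild n rem := by
  induction n with
  | zero =>
    intro L word rem _ _ _
    simp [pvOuter, pvBuild]
  | succ n ih =>
    intro L word rem hlen hlo hhi
    push_cast at hlen hlo hhi
    have hneed : L - word.length - 1 = (n : Int) := by omega
    have h1 : 1 ≤ rem - (L - word.length - 1) := by omega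
    simp only [pvOuter]
    rw [pvInner_spec 25 L word rem h1]
    rw [hneed]
    have h26 : ((25 : Nat) : Int) + 1 = 26 := by norm_num
    rw [h26]
    set v : Int := min (26 : Int) (rem - (n : Int)) with hv
    have hv1 : 1 ≤ v := by omega
    have hv26 : v ≤ 26 := by omega
    have hlo' : (n : Int) ≤ rem - v := by omega
    have hhi' : rem - v ≤ 26 * (n : Int) := by omega
    have hlen' : L - (word ++ [pvLetters.getD (min 25 (rem - (n : Int) - 1).toNat) ' ']).length = (n : Int) := by
      simp only [List.length_append, List.length_cons, List.length_nil]; push_cast; omega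
    rw [ih L _ (rem - v) (by exact_mod_cast hlen') (by exact_mod_cast hlo') (by exact_mod_cast hhi')]
    rw [List.append_assoc]
    congr 1
    -- remains: letter :: pvBuild n (rem - v) = pvBuild (n+1) rem
    have he : 0 ≤ rem - ((n : Int) + 1) := by omega
    set e : Nat := (rem - ((n : Int) + 1)).toNat with hedef
    have heq : rem - ((n : Int) + 1) = (e : Int) := by omega
    by_cases hbig : 25 ≤ e
    · -- v = 26, letter 'z', recurse with e' = e - 25
      have hveq : v = 26 := by omega
      have hk : min 25 (rem - (n : Int) - 1).toNat = 25 := by omega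
      rw [hk, pvLetters_getD 25 (by norm_num)]
      have he' : (rem - v - (n : Int)).toNat = e - 25 := by omega
      simp only [pvBuild, he']
      have h2 : (rem - (((n : Nat) + 1 : Nat) : Int)).toNat = e := by push_cast; omega
      rw [h2]
      have hq : e / 25 = (e - 25) / 25 + 1 := by omega
      have hr : e % 25 = (e - 25) % 25 := by omega
      rw [hq, hr]
      by_cases hc : n ≤ (e - 25) / 25
      · rw [if_pos hc, if_pos (by omega)]
        simp [List.replicate_succ]
      · rw [if_neg hc, if_neg (by omega)]
        have hcnt : n + 1 - ((e - 25) / 25 + 1) - 1 = n - (e - 25) / 25 - 1 := by omega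
        rw [hcnt, List.replicate_succ]
        simp
    · -- v = e + 1 ≤ 26, letter index e, everything after is 'a'
      have hveq : v = (e : Int) + 1 := by omega
      have hk : min 25 (rem - (n : Int) - 1).toNat = e := by omega
      rw [hk, pvLetters_getD e (by omega)]
      have he' : (rem - v - (n : Int)).toNat = 0 := by omega
      simp only [pvBuild, he']
      have h2 : (rem - (((n : Nat) + 1 : Nat) : Int)).toNat = e := by push_cast; omega
      rw [h2]
      have hq : e / 25 = 0 := by omega
      have hr : e % 25 = e := by omega
      rw [hq, hr]
      rw [if_neg (by omega : ¬ n + 1 ≤ 0)]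
      cases n with
      | zero => simp
      | succ m =>
        rw [if_neg (by omega : ¬ m + 1 ≤ 0)]
        simp [List.replicate_succ]

-- ===== VERDICT (by name: the statement is the Claim_ definition above) =====
theorem get_weighted_word_spec : Claim_equal_get_weighted_word := by
  intro L W _
  unfold Spec_get_weighted_word get_weighted_word get_weighted_word_alt
  by_cases hg : W < L ∨ W > L * 26
  · rw [if_pos hg, if_pos hg]
  · rw [if_neg hg, if_neg hg]
    rw [not_or, not_lt, not_lt] at hg
    obtain ⟨hlo, hhi⟩ := hg
    have hL : 0 ≤ L := by nlinarith
    rw [pvOuter_spec L.toNat L [] W (by simp; omega) (by omega) (by omega)]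
    simp only [List.nil_append]
    have hePos : 0 ≤ W - L := by omega
    have hfd : PySem.Int.floordiv (W - L) 25 = ((((W - L).toNat / 25 : Nat)) : Int) := by
      rw [PySem.Int.floordiv_eq_ediv_of_pos (by norm_num)]
      omega
    have hmd : PySem.Int.mod (W - L) 25 = ((((W - L).toNat % 25 : Nat)) : Int) := by
      rw [PySem.Int.mod_eq_emod_of_pos (by norm_num)]
      omega
    simp only [pvBuild, hfd, hmd]
    have hWL : (W - (L.toNat : Int)).toNat = (W - L).toNat := by omega
    rw [hWL]
    set e : Nat := (W - L).toNat with hedef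
    by_cases hc : L.toNat ≤ e / 25
    · rw [if_pos hc, if_pos (by omega)]
    · rw [if_neg hc, if_neg (by omega)]
      have ha : 'a'.toNat = 97 := rfl
      rw [ha]
      have h1 : ((e / 25 : Nat) : Int).toNat = e / 25 := by omega
      have h2 : 97 + ((e % 25 : Nat) : Int).toNat = 97 + e % 25 := by omega
      have h3 : (L - ((e / 25 : Nat) : Int) - 1).toNat = L.toNat - e / 25 - 1 := by omega
      rw [h1, h2, h3]
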